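-- pv_equiv track=rewrite | github.com/petecao/Connect-4 | main.py | horizontalWin
-- ===== SOURCE A (Python) =====
-- def horizontalWin(board,playedRow, playedColumn):
-- 	'''sees if you win horizontally'''
-- 	win = False
-- 	horizontalRow = board[playedRow-1]
-- 	horizontalCounter = 1
-- 	for i in range(len(horizontalRow)-1):
-- 		if horizontalCounter != 4:
-- 			if horizontalRow[i] == horizontalRow[i+1] and horizontalRow[i] != '-':
-- 				horizontalCounter+=1
-- 			else:
-- 				horizontalCounter = 1
-- 		if horizontalCounter == 4:
-- 			win = True
-- 			break
-- 	return win
-- ===== SOURCE B (Python) =====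
-- def horizontalWin(board, playedRow, playedColumn):
--     '''sees if you win horizontally: build runs of equal cells, then look for a non-'-' run of length >= 4'''
--     row = board[playedRow - 1]
--     runs = []
--     for cell in row:
--         if runs and runs[-1][0] == cell:
--             runs[-1][1] += 1
--         else:
--             runs.append([cell, 1])
--     return any(v != '-' and n >= 4 for v, n in runs)
-- ===== Notes on version B (the rewrite author's own statement) =====
-- stated objective: alternative
-- what changed: B replaces A's adjacent-pair comparison loop with a capped counter and early break by a run-length encoding pass (build runs of equal cells, then check for a non-'-' run of length >= 4).
import Mathlib
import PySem

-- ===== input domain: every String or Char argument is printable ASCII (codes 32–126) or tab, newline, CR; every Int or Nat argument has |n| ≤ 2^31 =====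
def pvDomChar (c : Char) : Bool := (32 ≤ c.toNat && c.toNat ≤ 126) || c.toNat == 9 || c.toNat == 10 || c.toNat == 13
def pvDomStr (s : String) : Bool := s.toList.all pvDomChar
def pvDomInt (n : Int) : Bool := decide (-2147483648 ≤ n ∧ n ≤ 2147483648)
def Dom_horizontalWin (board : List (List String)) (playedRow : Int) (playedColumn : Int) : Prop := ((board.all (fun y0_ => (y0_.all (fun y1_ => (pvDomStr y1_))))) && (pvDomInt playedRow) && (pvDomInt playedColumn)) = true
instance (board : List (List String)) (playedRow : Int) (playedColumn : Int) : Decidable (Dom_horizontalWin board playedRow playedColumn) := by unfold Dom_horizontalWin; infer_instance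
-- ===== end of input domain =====

-- B replaces A's adjacent-pair loop (capped counter, early break) by a run-length-encoding pass:
-- build the runs of equal cells, then check for a non-'-' run of length ≥ 4; same O(n) cost.

-- ===== PORT A =====
-- the for-loop over range(len(row)-1): 'win' stays False until the break, so the loop returns
-- the Bool directly; 'horizontalCounter' is the Int state c; c' is the counter after the first if
def pvALoop (row : List String) : List Int → Int → Bool
  | [], _ => false
  | i :: rest, c =>
    let c' := if c ≠ 4 then
        (if PySem.List.pyGet? row i = PySem.List.pyGet? row (i + 1) ∧
            PySem.List.pyGet? row i ≠ some "-" then c + 1 else 1)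
      else c
    if c' = 4 then true else pvALoop row rest c'

def horizontalWin (board : List (List String)) (playedRow : Int) (playedColumn : Int) : Bool :=
  match PySem.List.pyGet? board (playedRow - 1) with
  | none => false  -- unreachable under Pre_ (IndexError in Python)
  | some horizontalRow =>
      pvALoop horizontalRow (PySem.List.pyRange 0 ((horizontalRow.length : Int) - 1) 1) 1

-- ===== PORT B =====
-- Python builds 'runs' by appending / mutating the last entry; here the acc keeps the LAST
-- (current) run at its head and is reversed at the end, mirroring that
def pvBRuns : List String → List (String × Int) → List (String × Int)
  | [], acc => acc.reverse
  | cell :: rest, acc =>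
    match acc with
    | (v, n) :: t => if v = cell then pvBRuns rest ((v, n + 1) :: t)
                     else pvBRuns rest ((cell, 1) :: (v, n) :: t)
    | [] => pvBRuns rest [(cell, 1)]

def horizontalWin_alt (board : List (List String)) (playedRow : Int) (playedColumn : Int) : Bool :=
  match PySem.List.pyGet? board (playedRow - 1) with
  | none => false  -- unreachable under Pre_ (IndexError in Python)
  | some row => (pvBRuns row []).any (fun p => p.1 ≠ "-" && 4 ≤ p.2)

-- ===== PRECONDITION & SPEC =====
-- Pre_ excludes exactly the inputs where Python's board[playedRow-1] raises IndexError (B raises there too)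
def Pre_horizontalWin (board : List (List String)) (playedRow : Int) (playedColumn : Int) : Prop :=
  PySem.Raise.InRange board.length (playedRow - 1)
instance (board : List (List String)) (playedRow : Int) (playedColumn : Int) : Decidable (Pre_horizontalWin board playedRow playedColumn) := by unfold Pre_horizontalWin; infer_instance

def pvWitness_horizontalWin : List (List String) × Int × Int :=
  ([["x", "x", "x", "x", "-"]], 1, 0)

def Spec_horizontalWin (board : List (List String)) (playedRow : Int) (playedColumn : Int) (out : Bool) : Prop := out = horizontalWin_alt board playedRow playedColumn
instance (board : List (List String)) (playedRow : Int) (playedColumn : Int) (out : Bool) : Decidable (Spec_horizontalWin board playedRow playedColumn out) := by unfold Spec_horizontalWin; infer_instance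

-- ===== CLAIM (what is proved, stated in full; the proofs are below) =====
def Claim_equal_horizontalWin : Prop := ∀ (board : List (List String)) (playedRow : Int) (playedColumn : Int), Dom_horizontalWin board playedRow playedColumn → Pre_horizontalWin board playedRow playedColumn → Spec_horizontalWin board playedRow playedColumn (horizontalWin board playedRow playedColumn)

-- ===== LEMMAS AND PROOFS =====

-- common intermediate spec: pvF rest v c = "scanning rest while inside a run of value v of
-- (capped) length c, some non-'-' run eventually reaches length 4"
def pvF : List String → String → Int → Bool
  | [], _, _ => false
  | y :: rest, v, c =>
    if y = v ∧ v ≠ "-" then (if c + 1 = 4 then true else pvF rest v (c + 1))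
    else pvF rest y 1

-- structural (suffix-based) version of A's index loop body
def pvFA : List String → Int → Bool
  | x :: y :: rest, c =>
    let c' := if c ≠ 4 then (if x = y ∧ x ≠ "-" then c + 1 else 1) else c
    if c' = 4 then true else pvFA (y :: rest) c'
  | _, _ => false

theorem pvFA_eq_pvF (rest : List String) (x : String) (c : Int)
    (h1 : 1 ≤ c) (h3 : c ≤ 3) : pvFA (x :: rest) c = pvF rest x c := by
  induction rest generalizing x c with
  | nil => simp [pvFA, pvF]
  | cons y rest ih =>
    have hc4 : c ≠ 4 := by omega
    by_cases hxy : x = y ∧ x ≠ "-"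
    · have hyx : y = x ∧ x ≠ "-" := ⟨hxy.1.symm, hxy.2⟩
      by_cases h4 : c + 1 = 4
      · simp only [pvFA, pvF, if_pos hxy, if_pos hyx, if_pos h4, if_neg hc4, ite_not]
      · simp only [pvFA, pvF, if_pos hxy, if_pos hyx, if_neg h4, if_neg hc4, ite_not]
        rw [ih y (c + 1) (by omega) (by omega), hxy.1]
    · have hyx : ¬ (y = x ∧ x ≠ "-") := fun h => hxy ⟨h.1.symm, h.2⟩
      have h14 : (1 : Int) ≠ 4 := by omega
      simp only [pvFA, pvF, if_neg hxy, if_neg hyx, if_neg h14, if_neg hc4, ite_not]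
      exact ih y 1 (by omega) (by omega)

-- A's index loop over pyRange equals pvFA on the dropped suffix
theorem pvALoop_eq_pvFA (row : List String) (d i : Nat) (c : Int)
    (hd : i + d = row.length) :
    pvALoop row (PySem.List.pyRange (i : Int) ((row.length : Int) - 1) 1) c
      = pvFA (row.drop i) c := by
  induction d generalizing i c with
  | zero =>
    rw [PySem.List.pyRange_one_eq_nil (by omega), List.drop_eq_nil_of_le (by omega)]
    simp [pvALoop, pvFA]
  | succ d ih =>
    have hi : i < row.length := by omega
    by_cases hlast : i + 1 = row.length
    · rw [PySem.List.pyRange_one_eq_nil (by omega)]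
      have hsing : row.drop i = [row[i]] := by
        rw [List.drop_eq_getElem_cons hi, List.drop_eq_nil_of_le (by omega)]
      simp [pvALoop, hsing, pvFA]
    · have hi1 : i + 1 < row.length := by omega
      have hcast : ((i : Int) + 1) = (((i + 1 : Nat)) : Int) := by push_cast; ring
      have hget : PySem.List.pyGet? row (i : Int) = some row[i] := by
        simp [PySem.List.pyGet?_natCast, List.getElem?_eq_getElem hi]
      have hget1 : PySem.List.pyGet? row ((i : Int) + 1) = some row[i + 1] := by
        rw [hcast, PySem.List.pyGet?_natCast]
        exact List.getElem?_eq_getElem hi1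
      have hdrop : row.drop i = row[i] :: row[i + 1] :: row.drop (i + 2) := by
        rw [List.drop_eq_getElem_cons hi, List.drop_eq_getElem_cons hi1]
      have hdrop1 : row.drop (i + 1) = row[i + 1] :: row.drop (i + 2) :=
        List.drop_eq_getElem_cons hi1
      rw [PySem.List.pyRange_one_cons (by omega), hdrop]
      have hih := ih (i + 1)
      rw [← hcast] at hih
      simp only [pvALoop, pvFA, hget, hget1, Option.some.injEq, ne_eq,
        hih _ (by omega), hdrop1]

-- the counter is irrelevant while sitting on a '-' run
theorem pvF_dash (rest : List String) (c : Int) : pvF rest "-" c = pvF rest "-" 1 := by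
  cases rest <;> simp [pvF]

-- one step of B's run extension matches one step of the counter scan
theorem pvBRuns_step_match (rest : List String) (v : String) (n : Int) (hn : 1 ≤ n) :
    (if v ≠ "-" ∧ 4 ≤ n + 1 then true else pvF rest v (n + 1))
      = (if v ≠ "-" ∧ 4 ≤ n then true else pvF (v :: rest) v n) := by
  by_cases hv : v = "-"
  · subst hv
    rw [if_neg (by simp), if_neg (by simp)]
    have h1 : pvF ("-" :: rest) "-" n = pvF rest "-" 1 := by simp [pvF]
    rw [h1, pvF_dash rest (n + 1)]
  · have hvv : (v = v ∧ v ≠ "-") := ⟨rfl, hv⟩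
    by_cases h4 : 4 ≤ n
    · rw [if_pos ⟨hv, by omega⟩, if_pos ⟨hv, h4⟩]
    · by_cases h3 : n = 3
      · subst h3
        rw [if_pos ⟨hv, by omega⟩, if_neg (fun h => h4 h.2)]
        simp [pvF, hvv]
      · rw [if_neg (show ¬ (v ≠ "-" ∧ 4 ≤ n + 1) from fun h => absurd h.2 (by omega)),
            if_neg (fun h => h4 h.2)]
        simp [pvF, hvv, show ¬ n + 1 = 4 from by omega]

-- B's run builder, measured through the final 'any', equals pvF on the remaining input
theorem pvBRuns_any (rest : List String) (v : String) (n : Int)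
    (t : List (String × Int)) (hn : 1 ≤ n) :
    ((pvBRuns rest ((v, n) :: t)).any (fun p => p.1 ≠ "-" && 4 ≤ p.2))
      = ((if v ≠ "-" ∧ 4 ≤ n then true else pvF rest v n)
          || (t.any (fun p => p.1 ≠ "-" && 4 ≤ p.2))) := by
  induction rest generalizing v n t with
  | nil =>
    simp only [pvBRuns, List.any_reverse, List.any_cons, pvF]
    by_cases h : v ≠ "-" ∧ 4 ≤ n
    · simp [h.1, h.2]
    · simp only [if_neg h, Bool.false_or]
      rcases not_and_or.mp h with h' | h'
      · simp at h'; simp [h']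
      · have h2 : ¬ (4 : Int) ≤ n := h'
        by_cases hv : v = "-" <;> simp [hv, h2]
  | cons c rest ih =>
    simp only [pvBRuns]
    by_cases hvc : v = c
    · subst hvc
      rw [if_pos rfl, ih v (n + 1) t (by omega)]
      rw [pvBRuns_step_match rest v n hn]
    · rw [if_neg hvc, ih c 1 ((v, n) :: t) (by omega)]
      simp only [List.any_cons]
      rw [if_neg (show ¬ ((c ≠ "-") ∧ (4 : Int) ≤ 1) from fun h => by omega)]
      by_cases h : v ≠ "-" ∧ 4 ≤ n
      · simp [h.1, h.2]
      · rw [if_neg h]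
        have hP : (!decide (v = "-") && decide (4 ≤ n)) = false := by
          rcases not_and_or.mp h with h' | h'
          · simp at h'; simp [h']
          · simp [h']
        have hpf : pvF (c :: rest) v n = pvF rest c 1 := by
          simp only [pvF]
          rw [if_neg (show ¬ (c = v ∧ v ≠ "-") from fun hh => hvc hh.1.symm)]
        rw [hpf]
        simp [hP]

-- the two row scans agree
theorem pv_row_eq (row : List String) :
    pvALoop row (PySem.List.pyRange 0 ((row.length : Int) - 1) 1) 1
      = (pvBRuns row []).any (fun p => p.1 ≠ "-" && 4 ≤ p.2) := by
  cases row with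
  | nil => simp [pvALoop, pvBRuns, PySem.List.pyRange_one_eq_nil]
  | cons x rest =>
    have hA := pvALoop_eq_pvFA (x :: rest) (x :: rest).length 0 1 (by simp)
    simp only [Nat.cast_zero] at hA
    rw [hA, List.drop_zero, pvFA_eq_pvF rest x 1 (by omega) (by omega)]
    simp only [pvBRuns]
    rw [pvBRuns_any rest x 1 [] (by omega)]
    rw [if_neg (show ¬ (x ≠ "-" ∧ (4 : Int) ≤ 1) from fun h => by omega)]
    simp

-- ===== VERDICT (by name: the statement is the Claim_ definition above) =====
theorem horizontalWin_spec : Claim_equal_horizontalWin := by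
  intro board playedRow playedColumn _ hpre
  unfold Spec_horizontalWin horizontalWin horizontalWin_alt
  obtain ⟨row, hrow⟩ := Option.isSome_iff_exists.mp
    (by
      rw [Option.isSome_iff_ne_none]
      intro h
      exact (PySem.List.pyGet?_eq_none_iff (xs := board) (i := playedRow - 1)).mp h hpre)
  rw [hrow]
  exact pv_row_eq row
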